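-- pv_equiv track=rewrite | github.com/Ad2266/CS529-Final | search_central.py | _choose_initial_center
-- ===== SOURCE A (Python) =====
-- from typing import Iterable, List, Sequence, Set, Tuple
--
-- Edge = Tuple[int, int]
--
-- TriKey = Tuple[Edge, ...]
--
-- def edge_set_from_trikey(key: TriKey) -> Set[Edge]:
--     return set(key)
--
-- def _objective_sum(
--     center_key: TriKey,
--     tri_edge_sets: Sequence[Set[Edge]],
-- ) -> int:
--     center_edges = edge_set_from_trikey(center_key)
--     total = 0
--     for edges_i in tri_edge_sets:
--         total += len(center_edges ^ edges_i) // 2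
--     return total
--
-- def _choose_initial_center(
--     tri_keys: Sequence[TriKey],
--     tri_edge_sets: Sequence[Set[Edge]],
-- ) -> Tuple[int, TriKey, int]:
--     best_idx = 0
--     best_obj = float("inf")
--     for j, key in enumerate(tri_keys):
--         obj = _objective_sum(key, tri_edge_sets)
--         if obj < best_obj:
--             best_obj = obj
--             best_idx = j
--     return best_idx, tri_keys[best_idx], int(best_obj)
-- ===== SOURCE B (Python) =====
-- def _choose_initial_center(tri_keys, tri_edge_sets):
--     # O(n*k): per-edge occurrence counts + size sums replace the per-center pass over all sets.
--     cnt = {}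
--     total_sz = 0
--     half_sz = 0
--     for s in tri_edge_sets:
--         t = len(s)
--         total_sz += t
--         half_sz += t // 2
--         for e in s:
--             cnt[e] = cnt.get(e, 0) + 1
--     n = len(tri_edge_sets)
--     objs = []
--     for key in tri_keys:
--         center = set(key)
--         c = len(center)
--         base = n * (c // 2) + (half_sz if c % 2 == 0 else total_sz - half_sz)
--         objs.append(base - sum(cnt.get(e, 0) for e in center))
--     best_obj = min(objs)
--     best_idx = objs.index(best_obj)
--     return best_idx, tri_keys[best_idx], best_obj
-- ===== Notes on version B (the rewrite author's own statement) =====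
-- stated objective: faster
-- what changed: A recomputes the symmetric difference against every edge set for every candidate center (O(n^2*k)); B makes one pass building a per-edge occurrence counter plus total/halved size sums and scores each center by the closed formula |S^T|//2 = (|S|+|T|)//2 - |S∩T|, then picks the first minimum with min/index.
import Mathlib
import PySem

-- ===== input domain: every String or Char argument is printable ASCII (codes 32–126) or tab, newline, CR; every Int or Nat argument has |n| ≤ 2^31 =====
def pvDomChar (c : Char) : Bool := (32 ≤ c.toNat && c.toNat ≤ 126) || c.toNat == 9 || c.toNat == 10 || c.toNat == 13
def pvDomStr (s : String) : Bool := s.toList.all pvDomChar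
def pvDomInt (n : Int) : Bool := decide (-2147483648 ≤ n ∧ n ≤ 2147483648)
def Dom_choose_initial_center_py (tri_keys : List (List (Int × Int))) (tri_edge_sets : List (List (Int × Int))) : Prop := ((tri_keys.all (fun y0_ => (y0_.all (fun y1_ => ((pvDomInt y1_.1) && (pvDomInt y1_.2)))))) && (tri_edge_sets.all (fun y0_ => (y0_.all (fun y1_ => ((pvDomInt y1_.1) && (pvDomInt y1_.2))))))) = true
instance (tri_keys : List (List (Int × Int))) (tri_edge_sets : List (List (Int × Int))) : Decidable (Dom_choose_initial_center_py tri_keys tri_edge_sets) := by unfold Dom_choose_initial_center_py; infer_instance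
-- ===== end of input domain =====

-- B replaces A's per-center pass over all edge sets by precomputed per-edge occurrence counts
-- and size sums, evaluating each center by a closed formula (objective: faster).

-- ===== PORT A =====
def pv_edge_set_from_trikey (key : List (Int × Int)) : List (Int × Int) :=
  PySem.Set.ofList key

def pv_objective_sum (center_key : List (Int × Int))
    (tri_edge_sets : List (List (Int × Int))) : Int :=
  let center_edges := pv_edge_set_from_trikey center_key
  tri_edge_sets.foldl
    (fun total edges_i =>
      total + PySem.Int.floordiv ((PySem.Set.symmDiff center_edges edges_i).length : Int) 2)
    0

def choose_initial_center_py (tri_keys : List (List (Int × Int)))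
    (tri_edge_sets : List (List (Int × Int))) : Int × (List (Int × Int)) × Int :=
  -- best_obj : Option Int; none models float('inf') (every int compares < inf)
  let r := (PySem.List.enumerate tri_keys).foldl
    (fun (st : Int × Option Int) jk =>
      let obj := pv_objective_sum jk.2 tri_edge_sets
      match st.2 with
      | none => (jk.1, some obj)
      | some b => if obj < b then (jk.1, some obj) else st)
    ((0 : Int), (none : Option Int))
  -- on tri_keys = [] Python raises (IndexError on tri_keys[0], OverflowError on int(inf)); excluded by Pre_
  (r.1, PySem.List.pyGetD tri_keys r.1 [], r.2.getD 0)

-- ===== PORT B =====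
def choose_initial_center_py_alt (tri_keys : List (List (Int × Int)))
    (tri_edge_sets : List (List (Int × Int))) : Int × (List (Int × Int)) × Int :=
  -- one pass over the edge sets: per-edge occurrence counter, total and halved size sums
  let acc := tri_edge_sets.foldl
    (fun (acc : PySem.Dict (Int × Int) Int × Int × Int) s =>
      (s.foldl (fun d e => d.insert e (d.getD e 0 + 1)) acc.1,
       acc.2.1 + (s.length : Int),
       acc.2.2 + PySem.Int.floordiv (s.length : Int) 2))
    (PySem.Dict.empty, (0 : Int), (0 : Int))
  let n : Int := (tri_edge_sets.length : Int)
  let objs := tri_keys.map (fun key =>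
    let center := PySem.Set.ofList key
    let c : Int := (center.length : Int)
    n * PySem.Int.floordiv c 2
      + (if PySem.Int.mod c 2 = 0 then acc.2.2 else acc.2.1 - acc.2.2)
      - center.foldl (fun a e => a + acc.1.getD e 0) 0)
  match PySem.List.min? objs (fun x => x) with
  | none => (0, [], 0)   -- min([]) raises ValueError when tri_keys = []; excluded by Pre_
  | some best_obj =>
    let best_idx : Int := (((PySem.List.index? objs best_obj).getD 0 : Nat) : Int)
    (best_idx, PySem.List.pyGetD tri_keys best_idx [], best_obj)

-- ===== PRECONDITION & SPEC =====
-- Pre_ excludes empty tri_keys, on which A raises (IndexError on tri_keys[0] / OverflowError on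
-- int(float('inf'))); the Nodup clause only states the representation invariant of the Python
-- set-typed argument (each element of tri_edge_sets is a set, i.e. a list of distinct edges).
def Pre_choose_initial_center_py (tri_keys : List (List (Int × Int))) (tri_edge_sets : List (List (Int × Int))) : Prop :=
  tri_keys ≠ [] ∧ ∀ s ∈ tri_edge_sets, s.Nodup
instance (tri_keys : List (List (Int × Int))) (tri_edge_sets : List (List (Int × Int))) : Decidable (Pre_choose_initial_center_py tri_keys tri_edge_sets) := by unfold Pre_choose_initial_center_py; infer_instance

def pvWitness_choose_initial_center_py : (List (List (Int × Int))) × (List (List (Int × Int))) :=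
  ([[(0, 1), (1, 2)], [(0, 1)]], [[(0, 1)], [(1, 2), (0, 1)]])

def Spec_choose_initial_center_py (tri_keys : List (List (Int × Int))) (tri_edge_sets : List (List (Int × Int))) (out : Int × (List (Int × Int)) × Int) : Prop := out = choose_initial_center_py_alt tri_keys tri_edge_sets
instance (tri_keys : List (List (Int × Int))) (tri_edge_sets : List (List (Int × Int))) (out : Int × (List (Int × Int)) × Int) : Decidable (Spec_choose_initial_center_py tri_keys tri_edge_sets out) := by unfold Spec_choose_initial_center_py; infer_instance

-- ===== CLAIM (what is proved, stated in full; the proofs are below) =====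
def Claim_equal_choose_initial_center_py : Prop := ∀ (tri_keys : List (List (Int × Int))) (tri_edge_sets : List (List (Int × Int))), Dom_choose_initial_center_py tri_keys tri_edge_sets → Pre_choose_initial_center_py tri_keys tri_edge_sets → Spec_choose_initial_center_py tri_keys tri_edge_sets (choose_initial_center_py tri_keys tri_edge_sets)

-- ===== LEMMAS AND PROOFS =====

-- the witness satisfies Dom and Pre
lemma pv_witness_ok : Dom_choose_initial_center_py pvWitness_choose_initial_center_py.1 pvWitness_choose_initial_center_py.2 ∧ Pre_choose_initial_center_py pvWitness_choose_initial_center_py.1 pvWitness_choose_initial_center_py.2 := by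
  decide

-- abstract form of A's selection loop (running best index / best objective)
def pvSel : List Int → Int → Int × Option Int → Int × Option Int
  | [], _, st => st
  | o :: os, j, st =>
      pvSel os (j + 1)
        (match st.2 with
         | none => (j, some o)
         | some b => if o < b then (j, some o) else st)

lemma pv_bridge {α : Type} (f : α → Int) (keys : List α) :
    ∀ (j : Int) (st : Int × Option Int),
    (PySem.List.enumerate keys j).foldl
      (fun (st : Int × Option Int) jk =>
        let obj := f jk.2
        match st.2 with
        | none => (jk.1, some obj)
        | some b => if obj < b then (jk.1, some obj) else st) st
      = pvSel (keys.map f) j st := by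
  induction keys with
  | nil => intro j st; simp [PySem.List.enumerate_nil, pvSel]
  | cons k ks ih =>
      intro j st
      rw [PySem.List.enumerate_cons, List.foldl_cons, List.map_cons]
      simp only [pvSel]
      exact ih (j + 1) _

lemma pv_foldl_min_le (os : List Int) : ∀ b : Int, os.foldl min b ≤ b := by
  induction os with
  | nil => intro b; simp
  | cons o os ih =>
      intro b
      calc (o :: os).foldl min b = os.foldl min (min b o) := rfl
        _ ≤ min b o := ih _
        _ ≤ b := min_le_left _ _

lemma pv_foldl_min_mem (os : List Int) : ∀ b : Int, os.foldl min b = b ∨ os.foldl min b ∈ os := by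
  induction os with
  | nil => intro b; simp
  | cons o os ih =>
      intro b
      rcases ih (min b o) with h | h
      · rcases le_total b o with hbo | hbo
        · left; simpa [min_eq_left hbo] using h
        · right; simp [List.foldl_cons]; left; rw [h]; exact (min_eq_right hbo)
      · right; simp [List.foldl_cons]; right; exact h

lemma pvSel_some (os : List Int) : ∀ (j bi b : Int),
    pvSel os j (bi, some b) =
      if os.foldl min b < b then
        (j + (((PySem.List.index? os (os.foldl min b)).getD 0 : Nat) : Int),
         some (os.foldl min b))
      else (bi, some b) := by
  induction os with
  | nil => intro j bi b; simp [pvSel]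
  | cons o os ih =>
      intro j bi b
      have hstep : pvSel (o :: os) j (bi, some b)
          = pvSel os (j + 1) (if o < b then (j, some o) else (bi, some b)) := by
        simp only [pvSel]
      by_cases h : o < b
      · -- min b o = o
        have hmin : min b o = o := min_eq_right h.le
        have hm_le : os.foldl min o ≤ o := pv_foldl_min_le os o
        rw [hstep, if_pos h, ih]
        have hfold : (o :: os).foldl min b = os.foldl min o := by
          simp [List.foldl_cons, hmin]
        by_cases h2 : os.foldl min o < o
        · -- overall min is inside os
          have hmem : os.foldl min o ∈ os := by
            rcases pv_foldl_min_mem os o with he | he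
            · omega
            · exact he
          have hne : o ≠ os.foldl min o := by omega
          obtain ⟨k0, hk0⟩ := Option.isSome_iff_exists.mp
            ((PySem.List.index?_isSome_iff os _).mpr hmem)
          have hcond : (o :: os).foldl min b < b := by rw [hfold]; omega
          rw [if_pos h2, if_pos hcond, hfold,
            PySem.List.index?_cons_of_ne os hne, hk0]
          simp
          ring
        · -- overall min is o itself, found at position j
          have heq : os.foldl min o = o := le_antisymm hm_le (by omega)
          have hcond : (o :: os).foldl min b < b := by rw [hfold]; omega
          rw [if_neg h2, if_pos hcond, hfold, heq, PySem.List.index?_cons_self]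
          simp
      · -- min b o = b
        have hmin : min b o = b := min_eq_left (by omega)
        have hfold : (o :: os).foldl min b = os.foldl min b := by
          simp [List.foldl_cons, hmin]
        rw [hstep, if_neg h, ih]
        by_cases h2 : os.foldl min b < b
        · have hmem : os.foldl min b ∈ os := by
            rcases pv_foldl_min_mem os b with he | he
            · omega
            · exact he
          have hne : o ≠ os.foldl min b := by omega
          obtain ⟨k0, hk0⟩ := Option.isSome_iff_exists.mp
            ((PySem.List.index?_isSome_iff os _).mpr hmem)
          have hcond : (o :: os).foldl min b < b := by rw [hfold]; omega
          rw [if_pos h2, if_pos hcond, hfold,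
            PySem.List.index?_cons_of_ne os hne, hk0]
          simp
          ring
        · have hcond : ¬ (o :: os).foldl min b < b := by rw [hfold]; omega
          rw [if_neg h2, if_neg hcond]

-- |t ∩ s| = |s ∩ t| for nodup lists
lemma pv_filter_comm (s t : List (Int × Int)) (hs : s.Nodup) (ht : t.Nodup) :
    (s.filter (fun e => t.contains e)).length = (t.filter (fun e => s.contains e)).length := by
  have hperm : (s.filter (fun e => t.contains e)).Perm (t.filter (fun e => s.contains e)) := by
    rw [List.perm_ext_iff_of_nodup (hs.filter _) (ht.filter _)]
    intro a
    simp [List.mem_filter, and_comm]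
  exact hperm.length_eq

-- Σ_{e ∈ center} count(e, t) = |center ∩ t| for nodup t
lemma pv_count_filter (center : List (Int × Int)) (t : List (Int × Int)) (ht : t.Nodup) :
    (center.map (fun e => (t.count e : Int))).sum
      = ((center.filter (fun e => t.contains e)).length : Int) := by
  induction center with
  | nil => simp
  | cons e ce ih =>
      by_cases h : e ∈ t
      · rw [List.map_cons, List.sum_cons, ih, List.count_eq_one_of_mem ht h]
        simp [h]; ring
      · rw [List.map_cons, List.sum_cons, ih, List.count_eq_zero_of_not_mem h]
        simp [h]

-- per-edge-set identity: |center △ s| // 2 = |center|//2 + (|s|//2 or |s|-|s|//2) - |center ∩ s|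
lemma pv_term (center s : List (Int × Int)) (hc : center.Nodup) (hs : s.Nodup) :
    PySem.Int.floordiv ((PySem.Set.symmDiff center s).length : Int) 2
      = PySem.Int.floordiv (center.length : Int) 2
        + (if PySem.Int.mod (center.length : Int) 2 = 0
            then PySem.Int.floordiv (s.length : Int) 2
            else (s.length : Int) - PySem.Int.floordiv (s.length : Int) 2)
        - ((center.filter (fun e => s.contains e)).length : Int) := by
  have hdiff : PySem.Set.symmDiff center s
      = center.filter (fun e => !(s.contains e)) ++ s.filter (fun e => !(center.contains e)) := rfl
  have h1 : (center.filter (fun e => s.contains e)).length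
      + (center.filter (fun e => !(s.contains e))).length = center.length :=
    (List.length_eq_length_filter_add (l := center) _).symm
  have h2 : (s.filter (fun e => center.contains e)).length
      + (s.filter (fun e => !(center.contains e))).length = s.length :=
    (List.length_eq_length_filter_add (l := s) _).symm
  have h3 := pv_filter_comm s center hs hc
  rw [hdiff, List.length_append]
  set X := (center.filter (fun e => s.contains e)).length with hX
  set A := (center.filter (fun e => !(s.contains e))).length with hA
  set B := (s.filter (fun e => !(center.contains e))).length with hB
  have hAB : ((A + B : Nat) : Int) = (A : Int) + (B : Int) := by push_cast; ring
  rw [hAB]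
  have e1 : PySem.Int.floordiv ((A : Int) + (B : Int)) 2 = (((A + B) / 2 : Nat) : Int) := by
    rw [← hAB]; exact PySem.Int.floordiv_natCast _ 2
  have e2 : PySem.Int.floordiv (center.length : Int) 2 = ((center.length / 2 : Nat) : Int) :=
    PySem.Int.floordiv_natCast _ 2
  have e3 : PySem.Int.floordiv (s.length : Int) 2 = ((s.length / 2 : Nat) : Int) :=
    PySem.Int.floordiv_natCast _ 2
  have e4 : PySem.Int.mod (center.length : Int) 2 = ((center.length % 2 : Nat) : Int) :=
    PySem.Int.mod_natCast _ 2
  rw [e1, e2, e3, e4]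
  by_cases hpar : center.length % 2 = 0
  · rw [if_pos (by exact_mod_cast hpar)]
    omega
  · rw [if_neg (by exact_mod_cast hpar)]
    omega

-- summed objective in closed form
lemma pv_obj_eq (center : List (Int × Int)) (hc : center.Nodup) :
    ∀ (tes : List (List (Int × Int))), (∀ s ∈ tes, s.Nodup) →
    (tes.map (fun s =>
        PySem.Int.floordiv ((PySem.Set.symmDiff center s).length : Int) 2)).sum
      = (tes.length : Int) * PySem.Int.floordiv (center.length : Int) 2
        + (if PySem.Int.mod (center.length : Int) 2 = 0
            then (tes.map (fun s => PySem.Int.floordiv (s.length : Int) 2)).sum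
            else (tes.map (fun s => (s.length : Int))).sum
              - (tes.map (fun s => PySem.Int.floordiv (s.length : Int) 2)).sum)
        - (center.map (fun e => (tes.map (fun s => (s.count e : Int))).sum)).sum := by
  intro tes
  induction tes with
  | nil =>
      intro _
      simp
  | cons s tes ih =>
      intro hnd
      have hs : s.Nodup := hnd s (by simp)
      have htes : ∀ u ∈ tes, u.Nodup := fun u hu => hnd u (by simp [hu])
      rw [List.map_cons, List.sum_cons, pv_term center s hc hs, ih htes]
      have hsum : (center.map (fun e => ((s :: tes).map (fun u => (u.count e : Int))).sum)).sum
          = (center.map (fun e => (s.count e : Int))).sum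
            + (center.map (fun e => (tes.map (fun u => (u.count e : Int))).sum)).sum := by
        rw [← PySem.List.sum_map_add_int]
        simp
      rw [hsum, pv_count_filter center s hs]
      simp only [List.map_cons, List.sum_cons, List.length_cons]
      push_cast
      split_ifs <;> ring

-- B's accumulator fold, componentwise
lemma pv_acc (tes : List (List (Int × Int))) :
    ∀ (d : PySem.Dict (Int × Int) Int) (a b : Int),
    tes.foldl
      (fun (acc : PySem.Dict (Int × Int) Int × Int × Int) s =>
        (s.foldl (fun d e => d.insert e (d.getD e 0 + 1)) acc.1,
         acc.2.1 + (s.length : Int),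
         acc.2.2 + PySem.Int.floordiv (s.length : Int) 2))
      (d, a, b)
      = (tes.flatten.foldl (fun d e => d.insert e (d.getD e 0 + 1)) d,
         a + (tes.map (fun s => (s.length : Int))).sum,
         b + (tes.map (fun s => PySem.Int.floordiv (s.length : Int) 2)).sum) := by
  induction tes with
  | nil => intro d a b; simp
  | cons s tes ih =>
      intro d a b
      rw [List.foldl_cons, ih, List.flatten_cons, List.foldl_append]
      simp only [List.map_cons, List.sum_cons]
      refine Prod.ext rfl (Prod.ext ?_ ?_) <;> simp <;> ring

-- A's per-key objective equals B's formula
lemma pv_key_eq (key : List (Int × Int)) (tes : List (List (Int × Int)))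
    (hnd : ∀ s ∈ tes, s.Nodup) :
    pv_objective_sum key tes
      = (tes.length : Int) * PySem.Int.floordiv ((PySem.Set.ofList key).length : Int) 2
        + (if PySem.Int.mod ((PySem.Set.ofList key).length : Int) 2 = 0
            then (tes.map (fun s => PySem.Int.floordiv (s.length : Int) 2)).sum
            else (tes.map (fun s => (s.length : Int))).sum
              - (tes.map (fun s => PySem.Int.floordiv (s.length : Int) 2)).sum)
        - ((PySem.Set.ofList key).map
            (fun e => (tes.map (fun s => (s.count e : Int))).sum)).sum := by
  unfold pv_objective_sum pv_edge_set_from_trikey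
  rw [PySem.List.foldl_add, zero_add,
    pv_obj_eq (PySem.Set.ofList key) (PySem.Set.nodup_ofList key) tes hnd]

-- reversed orientation of pv_key_eq, for rewriting B's formula into A's objective
lemma pv_key_eq' (tes : List (List (Int × Int))) (hnd : ∀ s ∈ tes, s.Nodup)
    (key : List (Int × Int)) :
    (tes.length : Int) * PySem.Int.floordiv ((PySem.Set.ofList key).length : Int) 2
      + (if PySem.Int.mod ((PySem.Set.ofList key).length : Int) 2 = 0
          then (tes.map (fun s => PySem.Int.floordiv (s.length : Int) 2)).sum
          else (tes.map (fun s => (s.length : Int))).sum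
            - (tes.map (fun s => PySem.Int.floordiv (s.length : Int) 2)).sum)
      - ((PySem.Set.ofList key).map
          (fun e => (tes.map (fun s => (s.count e : Int))).sum)).sum
    = pv_objective_sum key tes := (pv_key_eq key tes hnd).symm

-- count of an edge in the concatenation of all edge sets, as an Int sum
lemma pv_cnt (tes : List (List (Int × Int))) (e : Int × Int) :
    ((tes.flatten.count e : Nat) : Int) = (tes.map (fun s => (s.count e : Int))).sum := by
  induction tes with
  | nil => simp
  | cons s tes ih => simp [List.count_append, ← ih]

-- ===== VERDICT (by name: the statement is the Claim_ definition above) =====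
theorem choose_initial_center_py_spec : Claim_equal_choose_initial_center_py := by
  intro tri_keys tes _ hpre
  obtain ⟨hne, hnd⟩ := hpre
  unfold Spec_choose_initial_center_py
  obtain ⟨k, ks, rfl⟩ : ∃ k ks, tri_keys = k :: ks := by
    cases tri_keys with
    | nil => exact absurd rfl hne
    | cons k ks => exact ⟨k, ks, rfl⟩
  have hA : choose_initial_center_py (k :: ks) tes
      = (let r := pvSel ((k :: ks).map (fun key => pv_objective_sum key tes)) 0 (0, none);
         (r.1, PySem.List.pyGetD (k :: ks) r.1 [], r.2.getD 0)) := by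
    unfold choose_initial_center_py
    rw [pv_bridge (fun key => pv_objective_sum key tes) (k :: ks) 0 ((0 : Int), (none : Option Int))]
  rw [hA]
  rw [List.map_cons]
  have hsel1 : pvSel ((pv_objective_sum k tes) :: ks.map (fun key => pv_objective_sum key tes)) 0 (0, none)
      = pvSel (ks.map (fun key => pv_objective_sum key tes)) 1 (0, some (pv_objective_sum k tes)) := by
    simp only [pvSel]
    norm_num
  rw [hsel1, pvSel_some]
  simp only [choose_initial_center_py_alt]
  rw [pv_acc tes PySem.Dict.empty 0 0]
  simp only [zero_add, PySem.Dict.getD_foldl_insert_add_one, PySem.Dict.getD_empty,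
    PySem.List.foldl_add, pv_cnt, pv_key_eq' tes hnd]
  rw [List.map_cons, PySem.List.min?_id_cons]
  by_cases hlt : List.foldl min (pv_objective_sum k tes)
      (List.map (fun key => pv_objective_sum key tes) ks) < pv_objective_sum k tes
  · rw [if_pos hlt]
    have hne2 : pv_objective_sum k tes
        ≠ List.foldl min (pv_objective_sum k tes)
            (List.map (fun key => pv_objective_sum key tes) ks) := by omega
    have hmem : List.foldl min (pv_objective_sum k tes)
        (List.map (fun key => pv_objective_sum key tes) ks)
        ∈ List.map (fun key => pv_objective_sum key tes) ks := by
      rcases pv_foldl_min_mem (List.map (fun key => pv_objective_sum key tes) ks)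
        (pv_objective_sum k tes) with he | he
      · omega
      · exact he
    obtain ⟨k0, hk0⟩ := Option.isSome_iff_exists.mp
      ((PySem.List.index?_isSome_iff _ _).mpr hmem)
    simp only [PySem.List.index?_cons_of_ne _ hne2, hk0, Option.map_some, Option.getD_some]
    push_cast
    rw [add_comm (1 : Int) (k0 : Int)]
  · rw [if_neg hlt]
    have heq : List.foldl min (pv_objective_sum k tes)
        (List.map (fun key => pv_objective_sum key tes) ks) = pv_objective_sum k tes :=
      le_antisymm (pv_foldl_min_le _ _) (by omega)
    rw [heq]
    have h0 : PySem.List.index?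
        (pv_objective_sum k tes :: List.map (fun key => pv_objective_sum key tes) ks)
        (pv_objective_sum k tes) = some 0 := PySem.List.index?_cons_self _ _
    simp only [PySem.List.index?_eq_idxOf?] at h0
    simp [h0]
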